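-- pv_equiv track=rewrite | github.com/paperwork-labs/paperwork | apis/brain/app/services/sprint_planner.py | paths_collide
-- ===== SOURCE A (Python) =====
-- def paths_collide(paths_a: list[str], paths_b: list[str]) -> bool:
--     """True if any path prefix overlaps (same file or shared directory prefix)."""
--     norm = [p.replace("\\", "/").strip().strip("/") for p in paths_a if p.strip()]
--     other = [p.replace("\\", "/").strip().strip("/") for p in paths_b if p.strip()]
--     if not norm or not other:
--         return False
--     for a in norm:
--         for b in other:
--             if a == b:
--                 return True
--             if a.startswith(b + "/") or b.startswith(a + "/"):
--                 return True
--     return False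
-- ===== SOURCE B (Python) =====
-- def paths_collide(paths_a: list[str], paths_b: list[str]) -> bool:
--     """True if any path prefix overlaps (same file or shared directory prefix).
--
--     Hash-set formulation: index the B side once (full paths + all their
--     directory prefixes), then each A path is checked by set lookups only.
--     """
--     def _norm(p):
--         return p.replace("\\", "/").strip().strip("/")
--
--     def _dir_prefixes(p):
--         # proper directory prefixes: p[:i] for every '/' at index i
--         return [p[:i] for i, c in enumerate(p) if c == "/"]
--
--     b_full = set()
--     b_pref = set()
--     for p in paths_b:
--         if p.strip():
--             q = _norm(p)
--             b_full.add(q)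
--             b_pref.update(_dir_prefixes(q))
--     if not b_full:
--         return False
--     for p in paths_a:
--         if p.strip():
--             a = _norm(p)
--             if a in b_full or a in b_pref:
--                 return True
--             if any(pre in b_full for pre in _dir_prefixes(a)):
--                 return True
--     return False
-- ===== Notes on version B (the rewrite author's own statement) =====
-- stated objective: alternative
-- what changed: Replaces the all-pairs nested startswith scan with hash sets of B's normalized paths and of all their directory prefixes built once, so each A path is decided by set lookups instead of being compared against every B path.
import Mathlib
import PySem

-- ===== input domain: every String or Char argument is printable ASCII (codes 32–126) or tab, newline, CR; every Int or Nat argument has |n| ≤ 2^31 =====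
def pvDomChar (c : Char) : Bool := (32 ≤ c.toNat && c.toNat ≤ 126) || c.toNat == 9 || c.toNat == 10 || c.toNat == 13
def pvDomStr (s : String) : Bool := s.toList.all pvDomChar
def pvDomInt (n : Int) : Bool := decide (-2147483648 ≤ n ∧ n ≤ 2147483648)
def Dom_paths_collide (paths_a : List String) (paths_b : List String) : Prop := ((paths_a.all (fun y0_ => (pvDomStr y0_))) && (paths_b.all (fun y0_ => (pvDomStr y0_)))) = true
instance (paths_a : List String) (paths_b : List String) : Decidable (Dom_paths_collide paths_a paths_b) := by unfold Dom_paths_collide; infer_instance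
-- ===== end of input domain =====

-- B indexes the B-side paths once in two hash sets (normalized paths and all their
-- directory prefixes) and decides each A-side path by set lookups, replacing A's all-pairs scan.


-- shared helpers of both ports:
-- pvNorm p = p.replace("\\", "/").strip().strip("/") ; pvKeep p = truthiness of p.strip()
def pvNorm (p : String) : List Char :=
  PySem.Chars.stripChars (PySem.Chars.strip (PySem.Chars.replace p.toList ['\\'] ['/'])) ['/']
def pvKeep (p : String) : Bool := !(PySem.Chars.strip p.toList).isEmpty

-- ===== PORT A =====
def paths_collide (paths_a : List String) (paths_b : List String) : Bool :=
  let norm := (paths_a.filter pvKeep).map pvNorm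
  let other := (paths_b.filter pvKeep).map pvNorm
  if norm.isEmpty || other.isEmpty then false
  else
    norm.any (fun a => other.any (fun b =>
      a == b || PySem.Chars.startswith a (b ++ ['/']) || PySem.Chars.startswith b (a ++ ['/'])))

-- ===== PORT B =====
-- _dir_prefixes(p) = [p[:i] for i, c in enumerate(p) if c == "/"]
def pvDirPrefixes (p : List Char) : List (List Char) :=
  ((PySem.List.enumerate p 0).filter (fun ic => ic.2 == '/')).map
    (fun ic => PySem.List.slice p none (some ic.1))

-- loop body of B's first loop: b_full.add(q); b_pref.update(_dir_prefixes(q))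
def pvStep (st : PySem.Set (List Char) × PySem.Set (List Char)) (p : String) :
    PySem.Set (List Char) × PySem.Set (List Char) :=
  if pvKeep p then
    let q := pvNorm p
    (PySem.Set.add st.1 q, PySem.Set.update st.2 (pvDirPrefixes q))
  else st

def pvBuildB (paths_b : List String) : PySem.Set (List Char) × PySem.Set (List Char) :=
  paths_b.foldl pvStep (PySem.Set.empty, PySem.Set.empty)

def paths_collide_alt (paths_a : List String) (paths_b : List String) : Bool :=
  let st := pvBuildB paths_b
  if st.1.isEmpty then false
  else
    paths_a.any (fun p =>
      pvKeep p &&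
        ((PySem.Set.contains st.1 (pvNorm p) || PySem.Set.contains st.2 (pvNorm p)) ||
          (pvDirPrefixes (pvNorm p)).any (fun pre => PySem.Set.contains st.1 pre)))

-- ===== PRECONDITION & SPEC =====
def Spec_paths_collide (paths_a : List String) (paths_b : List String) (out : Bool) : Prop := out = paths_collide_alt paths_a paths_b
instance (paths_a : List String) (paths_b : List String) (out : Bool) : Decidable (Spec_paths_collide paths_a paths_b out) := by unfold Spec_paths_collide; infer_instance

-- ===== CLAIM (what is proved, stated in full; the proofs are below) =====
def Claim_equal_paths_collide : Prop := ∀ (paths_a : List String) (paths_b : List String), Dom_paths_collide paths_a paths_b → Spec_paths_collide paths_a paths_b (paths_collide paths_a paths_b)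

-- ===== LEMMAS AND PROOFS =====

-- membership in B's directory-prefix list = "a followed by '/' is a string prefix"
lemma mem_pvDirPrefixes_iff (a b : List Char) :
    a ∈ pvDirPrefixes b ↔ (a ++ ['/']) <+: b := by
  constructor
  · intro h
    simp only [pvDirPrefixes, List.mem_map, List.mem_filter, PySem.List.mem_enumerate_iff] at h
    obtain ⟨ic, ⟨⟨k, hk, rfl⟩, hc⟩, rfl⟩ := h
    simp only [beq_iff_eq] at hc
    have hs : PySem.List.slice b none (some ((0:Int) + (k:Int))) = List.take k b := by
      rw [PySem.List.slice_to b (by positivity)]; norm_num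
    rw [hs]
    have h1 : List.take k b ++ ['/'] = List.take (k+1) b := by
      rw [List.take_add_one]
      congr 1
      simp [List.getElem?_eq_getElem hk, hc]
    rw [h1]; exact List.take_prefix _ _
  · intro h
    have hlen := h.length_le
    simp only [List.length_append, List.length_singleton] at hlen
    have hlt : a.length < b.length := by omega
    have heq : a ++ ['/'] = List.take (a.length + 1) b := by
      have := List.prefix_iff_eq_take.mp h
      simpa using this
    rw [List.take_add_one, List.getElem?_eq_getElem hlt] at heq
    simp only [Option.toList_some] at heq
    have h2 := List.append_inj heq (by simp [List.length_take]; omega)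
    obtain ⟨ha, hsl⟩ := h2
    simp only [List.cons.injEq] at hsl
    simp only [pvDirPrefixes, List.mem_map, List.mem_filter, PySem.List.mem_enumerate_iff]
    refine ⟨((a.length:Int), b[a.length]), ⟨⟨a.length, hlt, by norm_num⟩, by simp [hsl.1.symm]⟩, ?_⟩
    rw [PySem.List.slice_to b (by positivity)]
    simpa using ha.symm

lemma pvStep_pos {p : String} (st : PySem.Set (List Char) × PySem.Set (List Char)) (hk : pvKeep p) :
    pvStep st p = (PySem.Set.add st.1 (pvNorm p), PySem.Set.update st.2 (pvDirPrefixes (pvNorm p))) := by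
  simp only [pvStep, hk, if_true]

lemma pvStep_neg {p : String} (st : PySem.Set (List Char) × PySem.Set (List Char)) (hk : ¬ pvKeep p) :
    pvStep st p = st := by
  simp [pvStep, hk]

-- invariant of B's first loop: what the two sets contain
lemma pvFold_mem (paths_b : List String) (st : PySem.Set (List Char) × PySem.Set (List Char)) (x : List Char) :
    (x ∈ (paths_b.foldl pvStep st).1 ↔ x ∈ st.1 ∨ ∃ p ∈ paths_b, pvKeep p ∧ x = pvNorm p) ∧
    (x ∈ (paths_b.foldl pvStep st).2 ↔ x ∈ st.2 ∨ ∃ p ∈ paths_b, pvKeep p ∧ x ∈ pvDirPrefixes (pvNorm p)) := by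
  induction paths_b generalizing st with
  | nil => simp
  | cons p ps ih =>
    simp only [List.foldl_cons]
    by_cases hk : pvKeep p
    · rw [pvStep_pos st hk]
      obtain ⟨ih1, ih2⟩ := ih (PySem.Set.add st.1 (pvNorm p), PySem.Set.update st.2 (pvDirPrefixes (pvNorm p)))
      constructor
      · rw [ih1, PySem.Set.mem_add]
        simp only [List.mem_cons, exists_eq_or_imp, hk, true_and]
        exact or_assoc
      · rw [ih2, PySem.Set.mem_update]
        simp only [List.mem_cons, exists_eq_or_imp, hk, true_and]
        exact or_assoc
    · rw [pvStep_neg st hk]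
      obtain ⟨ih1, ih2⟩ := ih st
      constructor
      · rw [ih1]
        simp [hk]
      · rw [ih2]
        simp [hk]

lemma pvBuildB_mem (paths_b : List String) (x : List Char) :
    (x ∈ (pvBuildB paths_b).1 ↔ ∃ p ∈ paths_b, pvKeep p ∧ x = pvNorm p) ∧
    (x ∈ (pvBuildB paths_b).2 ↔ ∃ p ∈ paths_b, pvKeep p ∧ (x ++ ['/']) <+: pvNorm p) := by
  obtain ⟨h1, h2⟩ := pvFold_mem paths_b (PySem.Set.empty, PySem.Set.empty) x
  refine ⟨?_, ?_⟩
  · rw [pvBuildB, h1]; simp [PySem.Set.empty]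
  · rw [pvBuildB, h2]; simp [PySem.Set.empty, mem_pvDirPrefixes_iff]

lemma mem_build1 (pb : List String) (x : List Char) :
    x ∈ (pvBuildB pb).1 ↔ ∃ p ∈ pb, pvKeep p ∧ x = pvNorm p := (pvBuildB_mem pb x).1
lemma mem_build2 (pb : List String) (x : List Char) :
    x ∈ (pvBuildB pb).2 ↔ ∃ p ∈ pb, pvKeep p ∧ (x ++ ['/']) <+: pvNorm p := (pvBuildB_mem pb x).2

lemma pvBuildB_empty_iff (paths_b : List String) :
    (pvBuildB paths_b).1 = [] ↔ (paths_b.filter pvKeep) = [] := by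
  rw [List.eq_nil_iff_forall_not_mem, List.eq_nil_iff_forall_not_mem]
  constructor
  · intro h p hp
    rw [List.mem_filter] at hp
    exact h (pvNorm p) ((mem_build1 paths_b (pvNorm p)).mpr ⟨p, hp.1, hp.2, rfl⟩)
  · intro h x hx
    obtain ⟨p, hp, hkp, rfl⟩ := (mem_build1 paths_b x).mp hx
    exact h p (List.mem_filter.mpr ⟨hp, hkp⟩)

theorem pv_collide_eq (pa pb : List String) : paths_collide pa pb = paths_collide_alt pa pb := by
  by_cases hE : (pb.filter pvKeep) = []
  · have h1 : (pvBuildB pb).1 = [] := (pvBuildB_empty_iff pb).mpr hE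
    simp [paths_collide, paths_collide_alt, hE, h1]
  · have hBne : ((pvBuildB pb).1).isEmpty = false := by
      simp [List.isEmpty_eq_false_iff, Ne, pvBuildB_empty_iff, hE]
    have hOe : (((pb.filter pvKeep).map pvNorm)).isEmpty = false := by
      simp [List.isEmpty_eq_false_iff, hE]
    simp only [paths_collide, paths_collide_alt, hBne, hOe, Bool.or_false, Bool.false_eq_true, if_false]
    by_cases hN : (pa.filter pvKeep) = []
    · have hno : ∀ p ∈ pa, pvKeep p = false := by
        intro p hp
        have := List.filter_eq_nil_iff.mp hN p hp
        simpa using this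
      simp only [hN, List.map_nil, List.isEmpty_nil, if_true]
      rw [eq_comm, List.any_eq_false]
      intro p hp
      simp [hno p hp]
    · have hNe : (((pa.filter pvKeep).map pvNorm)).isEmpty = false := by
        simp [List.isEmpty_eq_false_iff, hN]
      simp only [hNe, Bool.false_eq_true, if_false]
      rw [Bool.eq_iff_iff]
      simp only [List.any_eq_true, List.mem_map, List.mem_filter, Bool.or_eq_true, beq_iff_eq,
        PySem.Chars.startswith_iff, PySem.Set.contains_iff, mem_build1, mem_build2,
        mem_pvDirPrefixes_iff, Bool.and_eq_true]
      constructor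
      · rintro ⟨a, ⟨p, ⟨hp, hkp⟩, rfl⟩, b, ⟨q, ⟨hq, hkq⟩, rfl⟩, hcol⟩
        refine ⟨p, hp, hkp, ?_⟩
        rcases hcol with (heq | hba) | hab
        · exact Or.inl (Or.inl ⟨q, hq, hkq, heq⟩)
        · exact Or.inr ⟨pvNorm q, hba, q, hq, hkq, rfl⟩
        · exact Or.inl (Or.inr ⟨q, hq, hkq, hab⟩)
      · rintro ⟨p, hp, hkp, hc⟩
        rcases hc with (⟨q, hq, hkq, heq⟩ | ⟨q, hq, hkq, hab⟩) | ⟨pre, hpre, q, hq, hkq, rfl⟩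
        · exact ⟨pvNorm p, ⟨p, ⟨hp, hkp⟩, rfl⟩, pvNorm q, ⟨q, ⟨hq, hkq⟩, rfl⟩, Or.inl (Or.inl heq)⟩
        · exact ⟨pvNorm p, ⟨p, ⟨hp, hkp⟩, rfl⟩, pvNorm q, ⟨q, ⟨hq, hkq⟩, rfl⟩, Or.inr hab⟩
        · exact ⟨pvNorm p, ⟨p, ⟨hp, hkp⟩, rfl⟩, pvNorm q, ⟨q, ⟨hq, hkq⟩, rfl⟩, Or.inl (Or.inr hpre)⟩

-- ===== VERDICT (by name: the statement is the Claim_ definition above) =====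
theorem paths_collide_spec : Claim_equal_paths_collide := by
  intro pa pb _
  unfold Spec_paths_collide
  exact pv_collide_eq pa pb
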